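-- pv_equiv track=rewrite | github.com/Arkadiy-Garber/PLOS-Biology-Review-code | ArkTools.py | tetfreq
-- ===== SOURCE A (Python) =====
-- from collections import defaultdict
--
-- def tetfreq(seq):
--     tet_Dict = defaultdict(list)
--     Nucs = ["T","A","G","C"]
--     for a in range(4):
--         for b in range(4):
--             for c in range(4):
--                 for d in range(4):
--                     if Nucs[a] in ["A", "G", "C", "T"] and Nucs[b] in ["A", "G", "C", "T"] and Nucs[c] in ["A", "G", "C", "T"] and Nucs[d] in ["A", "G", "C", "T"]:
--                         tet = Nucs[a] + Nucs[b] + Nucs[c] + Nucs[d]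
--                         tet_Dict[tet] = []
--
--     total = 0
--     for e in range(len(seq)):
--         f = (seq[e:e+4])
--         if len(f) == 4:
--             if f[0] in ["A", "G", "C", "T"] and f[1] in ["A", "G", "C", "T"] and f[2] in ["A", "G", "C", "T"] and f[3] in ["A", "G", "C", "T"]:
--                 tet_Dict[f].append(f)
--                 total += 1
--     totalkmers = total
--     return tet_Dict, total
-- ===== SOURCE B (Python) =====
-- from collections import defaultdict
--
-- def tetfreq(seq):
--     # pattern-directed: for each of the 256 tetramers, scan the sequence for its
--     # occurrences; a window equal to a tetramer is automatically a valid AGCT window.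
--     n = len(seq)
--     tet_Dict = defaultdict(list)
--     total = 0
--     for a in "TAGC":
--         for b in "TAGC":
--             for c in "TAGC":
--                 for d in "TAGC":
--                     tet = a + b + c + d
--                     occ = [tet for i in range(n - 3) if seq[i:i+4] == tet]
--                     tet_Dict[tet] = occ
--                     total += len(occ)
--     return tet_Dict, total
-- ===== Notes on version B (the rewrite author's own statement) =====
-- stated objective: alternative
-- what changed: B inverts the traversal: instead of A's single window scan that validates each 4-window and appends it into a pre-populated 256-key dict, B loops over the 256 tetramer patterns and for each one scans the sequence collecting exactly its occurrences (no validity check needed, since a window equal to a pattern is valid by construction); it trades a constant factor of up to 256 in the scan for the disappearance of validation and dict mutation.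
import Mathlib
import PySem

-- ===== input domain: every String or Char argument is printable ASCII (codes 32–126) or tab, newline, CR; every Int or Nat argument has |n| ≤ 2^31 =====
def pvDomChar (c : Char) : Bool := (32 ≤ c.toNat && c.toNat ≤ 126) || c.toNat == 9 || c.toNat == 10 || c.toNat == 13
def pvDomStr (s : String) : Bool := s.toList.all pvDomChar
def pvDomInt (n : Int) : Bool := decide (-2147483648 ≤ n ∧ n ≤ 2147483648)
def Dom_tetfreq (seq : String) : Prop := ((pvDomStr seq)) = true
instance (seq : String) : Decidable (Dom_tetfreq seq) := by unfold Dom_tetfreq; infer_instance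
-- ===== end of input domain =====

-- B inverts the traversal: it loops over the 256 tetramer patterns and scans the sequence
-- for each one's occurrences, instead of A's single validated window scan into a dict.

-- ===== PORT A =====
-- Python `x in ["A","G","C","T"]` for a single character (exact: the 1-char strings as Char)
def nucOK (c : Char) : Bool := (['A', 'G', 'C', 'T'] : List Char).contains c

def tetfreq (seq : String) : (List (String × List String)) × Int :=
  let Nucs : List Char := ['T', 'A', 'G', 'C']
  let d0 : PySem.Dict String (List String) :=
    (PySem.List.pyRange 0 4 1).foldl (fun dA a =>
      (PySem.List.pyRange 0 4 1).foldl (fun dB b =>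
        (PySem.List.pyRange 0 4 1).foldl (fun dC c =>
          (PySem.List.pyRange 0 4 1).foldl (fun dD d =>
            if nucOK (PySem.List.pyGetD Nucs a ' ') && nucOK (PySem.List.pyGetD Nucs b ' ') &&
               nucOK (PySem.List.pyGetD Nucs c ' ') && nucOK (PySem.List.pyGetD Nucs d ' ') then
              dD.insert (String.ofList [PySem.List.pyGetD Nucs a ' ', PySem.List.pyGetD Nucs b ' ',
                                        PySem.List.pyGetD Nucs c ' ', PySem.List.pyGetD Nucs d ' ']) []
            else dD) dC) dB) dA) PySem.Dict.empty
  -- string slicing/indexing ported on the character-list side (PySem.Chars view of str); exact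
  let cs := seq.toList
  let st :=
    (PySem.List.pyRange 0 (PySem.List.len cs) 1).foldl
      (fun (st : PySem.Dict String (List String) × Int) e =>
        let f := PySem.List.slice cs (some e) (some (e + 4))
        if f.length == 4 then
          if nucOK (PySem.List.pyGetD f 0 ' ') && nucOK (PySem.List.pyGetD f 1 ' ') &&
             nucOK (PySem.List.pyGetD f 2 ' ') && nucOK (PySem.List.pyGetD f 3 ' ') then
            (st.1.modify (String.ofList f) [] (· ++ [String.ofList f]), st.2 + 1)
          else st
        else st) (d0, (0 : Int))
  (st.1.items, st.2)

-- ===== PORT B =====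
def tetfreq_alt (seq : String) : (List (String × List String)) × Int :=
  let cs := seq.toList
  let n := PySem.List.len cs
  let st :=
    (['T','A','G','C'] : List Char).foldl (fun st a =>
      (['T','A','G','C'] : List Char).foldl (fun st b =>
        (['T','A','G','C'] : List Char).foldl (fun st c =>
          (['T','A','G','C'] : List Char).foldl
            (fun (st : PySem.Dict String (List String) × Int) d =>
              let tet := String.ofList [a, b, c, d]
              -- `[tet for i in range(n-3) if seq[i:i+4] == tet]` (string == is char-list ==)
              let occ := ((PySem.List.pyRange 0 (n - 3) 1).filter
                  (fun i => PySem.List.slice cs (some i) (some (i + 4)) == [a, b, c, d])).map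
                  (fun _ => tet)
              (st.1.insert tet occ, st.2 + occ.length)) st) st) st)
      ((PySem.Dict.empty : PySem.Dict String (List String)), (0 : Int))
  (st.1.items, st.2)

-- ===== PRECONDITION & SPEC =====
def Spec_tetfreq (seq : String) (out : (List (String × List String)) × Int) : Prop := out = tetfreq_alt seq
instance (seq : String) (out : (List (String × List String)) × Int) : Decidable (Spec_tetfreq seq out) := by unfold Spec_tetfreq; infer_instance

-- ===== CLAIM (what is proved, stated in full; the proofs are below) =====
def Claim_equal_tetfreq : Prop := ∀ (seq : String), Dom_tetfreq seq → Spec_tetfreq seq (tetfreq seq)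

-- ===== LEMMAS AND PROOFS =====

-- `all(ch valid)` over a window's characters
def allNuc (f : List Char) : Bool := f.all (fun ch => (['A', 'G', 'C', 'T'] : List Char).contains ch)

-- the 256 tetramers in generation order (both A's pre-population and B's outer loops)
def tfAll : List String :=
  (['T','A','G','C'] : List Char).flatMap (fun a =>
    (['T','A','G','C'] : List Char).flatMap (fun b =>
      (['T','A','G','C'] : List Char).flatMap (fun c =>
        (['T','A','G','C'] : List Char).map (fun d => String.ofList [a, b, c, d]))))

-- the valid 4-windows of cs, as strings, in scan order
def tfWins (cs : List Char) : List String :=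
  ((List.range (cs.length - 3)).filter (fun k => allNuc ((cs.drop k).take 4))).map
    (fun k => String.ofList ((cs.drop k).take 4))

-- A's per-window dict update
def tfIns (d : PySem.Dict String (List String)) (s : String) : PySem.Dict String (List String) :=
  d.modify s [] (· ++ [s])

set_option maxRecDepth 100000 in
lemma tfAll_nodup : tfAll.Nodup := by decide

-- A's 256-key pre-population loop, evaluated once and for all
set_option maxRecDepth 100000 in
lemma tfAll_valid : ∀ t ∈ tfAll, allNuc t.toList = true := by decide

set_option maxRecDepth 100000 in
lemma d0_eq :
    ((PySem.List.pyRange 0 4 1).foldl (fun dA a =>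
      (PySem.List.pyRange 0 4 1).foldl (fun dB b =>
        (PySem.List.pyRange 0 4 1).foldl (fun dC c =>
          (PySem.List.pyRange 0 4 1).foldl (fun dD d =>
            if nucOK (PySem.List.pyGetD (['T','A','G','C'] : List Char) a ' ') && nucOK (PySem.List.pyGetD (['T','A','G','C'] : List Char) b ' ') &&
               nucOK (PySem.List.pyGetD (['T','A','G','C'] : List Char) c ' ') && nucOK (PySem.List.pyGetD (['T','A','G','C'] : List Char) d ' ') then
              dD.insert (String.ofList [PySem.List.pyGetD (['T','A','G','C'] : List Char) a ' ', PySem.List.pyGetD (['T','A','G','C'] : List Char) b ' ',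
                                        PySem.List.pyGetD (['T','A','G','C'] : List Char) c ' ', PySem.List.pyGetD (['T','A','G','C'] : List Char) d ' ']) []
            else dD) dC) dB) dA) (PySem.Dict.empty : PySem.Dict String (List String)))
    = PySem.Dict.mk (tfAll.map (fun t => (t, ([] : List String)))) := by decide

lemma foldl_pair_split (P : Nat → Bool) (mkf : Nat → String) :
    ∀ (l : List Nat) (d : PySem.Dict String (List String)) (t : Int),
      l.foldl (fun st k => if P k then (tfIns st.1 (mkf k), st.2 + 1) else st) (d, t)
        = ((l.filter P).foldl (fun d k => tfIns d (mkf k)) d, t + (l.countP P : Int)) := by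
  intro l
  induction l with
  | nil => intro d t; simp
  | cons x xs ih =>
    intro d t
    by_cases h : P x = true
    · simp only [List.foldl_cons, List.filter_cons, List.countP_cons, h]
      rw [ih]
      refine Prod.ext rfl ?_
      dsimp only
      push_cast; ring
    · simp only [List.foldl_cons, List.filter_cons, List.countP_cons, h]
      rw [ih]
      simp

lemma valid4_eq (f : List Char) (hf : f.length = 4) :
    (nucOK (PySem.List.pyGetD f 0 ' ') && nucOK (PySem.List.pyGetD f 1 ' ') &&
     nucOK (PySem.List.pyGetD f 2 ' ') && nucOK (PySem.List.pyGetD f 3 ' ')) = allNuc f := by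
  match f, hf with
  | [a, b, c, d], _ =>
    simp [allNuc, PySem.List.pyGetD, nucOK, Bool.and_assoc]

lemma filter_range_and (q : Nat → Bool) :
    ∀ n m : Nat, m ≤ n →
      (List.range n).filter (fun k => decide (k < m) && q k) = (List.range m).filter q := by
  intro n
  induction n with
  | zero => intro m hm; interval_cases m; simp
  | succ n ih =>
    intro m hm
    rcases Nat.lt_or_ge m (n+1) with h | h
    · have hmn : m ≤ n := by omega
      rw [List.range_succ, List.filter_append, ih m hmn]
      have : ¬ (n < m) := by omega
      simp [this]
    · have hm1 : m = n + 1 := by omega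
      subst hm1
      refine List.filter_congr ?_
      intro k hk
      simp at hk
      simp [hk]

lemma mem_tfAll_of_valid (f : List Char) (h4 : f.length = 4) (hv : allNuc f = true) :
    String.ofList f ∈ tfAll := by
  match f, h4 with
  | [a, b, c, d], _ =>
    simp only [allNuc, List.all_cons, List.all_nil, Bool.and_true, Bool.and_eq_true,
      List.contains_eq_mem, decide_eq_true_eq] at hv
    obtain ⟨ha, hb, hc, hd⟩ := hv
    have hsub : ∀ x : Char, x ∈ (['A','G','C','T'] : List Char) → x ∈ (['T','A','G','C'] : List Char) := by
      intro x hx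
      simp only [List.mem_cons, List.not_mem_nil, or_false] at hx ⊢
      tauto
    simp only [tfAll, List.mem_flatMap, List.mem_map]
    exact ⟨a, hsub a ha, b, hsub b hb, c, hsub c hc, ⟨d, hsub d hd, rfl⟩⟩

lemma tfWins_mem (cs : List Char) : ∀ s ∈ tfWins cs, s ∈ tfAll := by
  intro s hs
  simp only [tfWins, List.mem_map, List.mem_filter, List.mem_range] at hs
  obtain ⟨k, ⟨hk, hv⟩, rfl⟩ := hs
  refine mem_tfAll_of_valid _ ?_ hv
  simp
  omega

lemma modifyfold_items (w : List String) (hw : ∀ s ∈ w, s ∈ tfAll) :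
    (w.foldl tfIns (PySem.Dict.mk (tfAll.map (fun t => (t, ([] : List String)))))).items
      = tfAll.map (fun t => (t, List.replicate (w.count t) t)) := by
  have htf : tfIns = fun d s => d.modify s [] (· ++ [s]) := rfl
  rw [htf]
  set d0 : PySem.Dict String (List String) := PySem.Dict.mk (tfAll.map (fun t => (t, ([] : List String)))) with hd0
  have hkeys0 : d0.keys = tfAll := by
    simp [hd0, PySem.Dict.keys, Function.comp_def]
  have hpair : w.foldl (fun d s => d.modify s [] (· ++ [s])) d0
      = (w.map (fun s => (s, s))).foldl (fun d p => d.modify p.1 [] (· ++ [p.2])) d0 := by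
    rw [List.foldl_map]
  have hkeys : (w.foldl (fun d s => d.modify s [] (· ++ [s])) d0).keys = tfAll := by
    rw [PySem.Dict.keys_foldl_modify, hkeys0, PySem.Set.update_eq_append_filter]
    have : (PySem.Set.ofList w).filter (fun y => !(PySem.Set.contains tfAll y)) = [] := by
      refine List.filter_eq_nil_iff.mpr ?_
      intro s hs
      have : s ∈ tfAll := hw s ((PySem.Set.mem_ofList _ _).mp hs)
      simp [this]
    rw [this, List.append_nil]
  have hgetD : ∀ c ∈ tfAll,
      (w.foldl (fun d s => d.modify s [] (· ++ [s])) d0).getD c [] = List.replicate (w.count c) c := by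
    intro c hc
    rw [hpair, PySem.Dict.getD_foldl_modify_append]
    have hmem0 : (c, ([] : List String)) ∈ d0.items := List.mem_map.mpr ⟨c, hc, rfl⟩
    have h0 : d0.getD c [] = [] :=
      PySem.Dict.getD_of_mem_items d0 hmem0 (by rw [hkeys0]; exact tfAll_nodup) []
    rw [h0, List.nil_append, List.filter_map]
    have h1 : ((fun p : String × String => p.1 == c) ∘ fun s => (s, s)) = (fun s => s == c) := rfl
    rw [h1, List.map_map]
    have h2 : ((fun p : String × String => p.2) ∘ fun s => (s, s)) = id := rfl
    rw [h2, List.map_id, List.filter_beq]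
  rw [PySem.Dict.items_eq_map_keys _ (by rw [hkeys]; exact tfAll_nodup) []]
  rw [hkeys]
  exact List.map_congr_left (fun c hc => by rw [hgetD c hc])

lemma canonA (seq : String) :
    tetfreq seq =
      (tfAll.map (fun t => (t, List.replicate ((tfWins seq.toList).count t) t)),
       ((tfWins seq.toList).length : Int)) := by
  simp only [tetfreq]
  rw [d0_eq]
  rw [PySem.List.pyRange_one]
  simp only [PySem.List.len_eq, sub_zero, Int.toNat_natCast, zero_add, List.foldl_map]
  have hsl : ∀ k : Nat, PySem.List.slice seq.toList (some (k : Int)) (some ((k : Int) + 4))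
      = (seq.toList.drop k).take 4 := by
    intro k; exact_mod_cast PySem.List.slice_natCast_add seq.toList k 4
  simp only [hsl]
  rw [PySem.List.foldl_congr_mem (List.range seq.toList.length) _
    (fun (st : PySem.Dict String (List String) × Int) (k : Nat) =>
      if decide (k < seq.toList.length - 3) && allNuc ((seq.toList.drop k).take 4) then
        (tfIns st.1 (String.ofList ((seq.toList.drop k).take 4)), st.2 + 1)
      else st) _ ?_]
  · rw [foldl_pair_split]
    rw [filter_range_and _ seq.toList.length (seq.toList.length - 3) (by omega)]
    rw [List.countP_eq_length_filter]
    rw [filter_range_and _ seq.toList.length (seq.toList.length - 3) (by omega)]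
    rw [← List.foldl_map]
    refine Prod.ext ?_ ?_ <;> dsimp only
    · exact modifyfold_items (tfWins seq.toList) (tfWins_mem seq.toList)
    · rw [zero_add, tfWins, List.length_map]
  · intro st k _
    by_cases h : k < seq.toList.length - 3
    · have h4 : ((seq.toList.drop k).take 4).length = 4 := by
        rw [List.length_take, List.length_drop]; omega
      have hb4 : (((seq.toList.drop k).take 4).length == 4) = true := by simp [h4]
      rw [hb4, valid4_eq _ h4]
      have h' : k < seq.length - 3 := by simpa using h
      simp [h', tfIns]
    · have hlen : seq.toList.length = seq.length := by simp
      have h1 : ¬ 4 ≤ seq.length - k := by omega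
      have h2 : ¬ k < seq.length - 3 := by omega
      simp [h1, h2]

-- ===== B-side lemmas =====

-- splitting B's paired fold (dict of fresh keys, running total)
lemma foldl_pair_insert_split (F : String → List String) :
    ∀ (l : List String) (d : PySem.Dict String (List String)) (t : Int),
      l.foldl (fun (st : PySem.Dict String (List String) × Int) k =>
          (st.1.insert k (F k), st.2 + ((F k).length : Int))) (d, t)
        = (l.foldl (fun d k => d.insert k (F k)) d, t + ((l.map (fun k => (F k).length)).sum : Int)) := by
  intro l
  induction l with
  | nil => intro d t; simp
  | cons x xs ih =>
    intro d t
    simp only [List.foldl_cons, List.map_cons, List.sum_cons]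
    rw [ih]
    refine Prod.ext rfl ?_
    dsimp only
    push_cast; ring

-- B's occurrence list for a tetramer t equals the replicate over the valid-window count
lemma occ_eq_replicate (cs : List Char) (t : String) (ht : t ∈ tfAll) :
    (((List.range (cs.length - 3)).filter
        (fun k => ((cs.drop k).take 4 : List Char) == t.toList)).map (fun _ => t))
      = List.replicate ((tfWins cs).count t) t := by
  have hvalid : allNuc t.toList = true := tfAll_valid t ht
  have hcount : (tfWins cs).count t
      = ((List.range (cs.length - 3)).filter
          (fun k => ((cs.drop k).take 4 : List Char) == t.toList)).length := by
    rw [tfWins, List.count_eq_countP, List.countP_map, List.countP_filter,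
      List.countP_eq_length_filter]
    congr 1
    refine List.filter_congr ?_
    intro k _
    by_cases h : (cs.drop k).take 4 = t.toList
    · have h1 : String.ofList ((cs.drop k).take 4) = t := by
        rw [h]; exact String.ofList_toList
      simp [h, hvalid]
    · have h1 : String.ofList ((cs.drop k).take 4) ≠ t := by
        intro he; exact h (by rw [← he]; simp)
      have h2 : (String.ofList ((cs.drop k).take 4) == t) = false := by simpa using h1
      have h3 : (((cs.drop k).take 4 : List Char) == t.toList) = false := by simpa using h
      simp [h2, h3]
  rw [hcount, List.eq_replicate_iff]
  constructor
  · rw [List.length_map]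
  · intro b hb
    simp only [List.mem_map] at hb
    obtain ⟨_, _, rfl⟩ := hb
    rfl

-- sum of the indicator of one string over a list is its count there
lemma sum_indicator (s : String) :
    ∀ L : List String, (L.map (fun t => if s = t then (1 : Int) else 0)).sum = (L.count s : Int) := by
  intro L
  induction L with
  | nil => simp
  | cons x xs ih =>
    simp only [List.map_cons, List.sum_cons, List.count_cons, ih]
    by_cases h : s = x
    · subst h
      simp
      ring
    · have hx : (x == s) = false := by simp [Ne.symm h]
      simp [h, hx]

-- sum of per-tetramer counts recovers the number of valid windows
lemma sum_count_tfAll :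
    ∀ (w : List String), (∀ s ∈ w, s ∈ tfAll) →
      (tfAll.map (fun t => (w.count t : Int))).sum = (w.length : Int) := by
  intro w
  induction w with
  | nil => intro _; simp
  | cons s ws ih =>
    intro hw
    have hs : s ∈ tfAll := hw s List.mem_cons_self
    have hmap : tfAll.map (fun t => (((s :: ws).count t : Nat) : Int))
        = tfAll.map (fun t => (ws.count t : Int) + (if s = t then (1 : Int) else 0)) := by
      refine List.map_congr_left ?_
      intro t _
      rw [List.count_cons]
      by_cases h : s = t
      · subst h
        simp
      · have hx : (s == t) = false := by simp [h]
        simp [h, hx]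
    rw [hmap, List.sum_map_add, ih (fun x hx => hw x (List.mem_cons_of_mem s hx)), sum_indicator]
    rw [List.count_eq_one_of_mem tfAll_nodup hs]
    simp

-- generic: folding over a flatMap folds the pieces in turn
lemma foldl_flatMap' {α β σ : Type} (l : List α) (f : α → List β) (g : σ → β → σ) (s : σ) :
    (l.flatMap f).foldl g s = l.foldl (fun s a => (f a).foldl g s) s := by
  induction l generalizing s with
  | nil => rfl
  | cons x xs ih => simp [List.flatMap_cons, List.foldl_append, ih]

-- B's occurrence list, as the port writes it (raw pyRange/slice form)
def occB (cs : List Char) (t : String) : List String :=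
  ((PySem.List.pyRange 0 (PySem.List.len cs - 3) 1).filter
      (fun i => PySem.List.slice cs (some i) (some (i + 4)) == t.toList)).map (fun _ => t)

-- B's four nested base loops are a single fold over the 256 tetramers
lemma nestedB (cs : List Char) :
    (['T','A','G','C'] : List Char).foldl (fun st a =>
      (['T','A','G','C'] : List Char).foldl (fun st b =>
        (['T','A','G','C'] : List Char).foldl (fun st c =>
          (['T','A','G','C'] : List Char).foldl
            (fun (st : PySem.Dict String (List String) × Int) d =>
              let tet := String.ofList [a, b, c, d]
              let occ := ((PySem.List.pyRange 0 (PySem.List.len cs - 3) 1).filter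
                  (fun i => PySem.List.slice cs (some i) (some (i + 4)) == [a, b, c, d])).map
                  (fun _ => tet)
              (st.1.insert tet occ, st.2 + occ.length)) st) st) st)
      ((PySem.Dict.empty : PySem.Dict String (List String)), (0 : Int))
    = tfAll.foldl (fun (st : PySem.Dict String (List String) × Int) t =>
        (st.1.insert t (occB cs t), st.2 + ((occB cs t).length : Int)))
        ((PySem.Dict.empty : PySem.Dict String (List String)), (0 : Int)) := by
  rw [tfAll]
  simp only [foldl_flatMap', List.foldl_map, occB, String.toList_ofList]

-- for each tetramer, B's raw occurrence list is the replicate over the window count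
lemma occB_eq (cs : List Char) (t : String) (ht : t ∈ tfAll) :
    occB cs t = List.replicate ((tfWins cs).count t) t := by
  have hsl : ∀ k : Nat, PySem.List.slice cs (some (k : Int)) (some ((k : Int) + 4))
      = (cs.drop k).take 4 := by
    intro k; exact_mod_cast PySem.List.slice_natCast_add cs k 4
  have hrange : PySem.List.pyRange 0 (PySem.List.len cs - 3) 1
      = (List.range (cs.length - 3)).map (fun k => ((k : Nat) : Int)) := by
    rw [PySem.List.pyRange_one]
    have h0 : ((PySem.List.len cs - 3) - 0).toNat = cs.length - 3 := by
      simp [PySem.List.len_eq]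
      omega
    rw [h0]
    simp
  rw [occB, hrange, List.filter_map, List.map_map]
  rw [← occ_eq_replicate cs t ht]
  refine congrArg₂ _ ?_ ?_
  · rfl
  · refine List.filter_congr ?_
    intro k _
    simp [hsl]

lemma canonB (seq : String) :
    tetfreq_alt seq =
      (tfAll.map (fun t => (t, List.replicate ((tfWins seq.toList).count t) t)),
       ((tfWins seq.toList).length : Int)) := by
  simp only [tetfreq_alt]
  rw [nestedB, foldl_pair_insert_split]
  refine Prod.ext ?_ ?_ <;> dsimp only
  · rw [PySem.Dict.items_foldl_insert_fresh tfAll (fun t => t) (occB seq.toList) PySem.Dict.empty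
      (fun a _ => PySem.Dict.contains_empty a) (by simpa using tfAll_nodup)]
    rw [show (PySem.Dict.empty : PySem.Dict String (List String)).items = [] from rfl,
      List.nil_append]
    exact List.map_congr_left (fun t ht => by rw [occB_eq seq.toList t ht])
  · rw [zero_add]
    have h1 : (tfAll.map (fun t => (occB seq.toList t).length))
        = tfAll.map (fun t => (tfWins seq.toList).count t) := by
      refine List.map_congr_left ?_
      intro t ht
      rw [occB_eq seq.toList t ht, List.length_replicate]
    rw [h1]
    have h2 := sum_count_tfAll (tfWins seq.toList) (tfWins_mem seq.toList)
    rw [← h2, Nat.cast_list_sum, List.map_map]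
    rfl

-- ===== VERDICT (by name: the statement is the Claim_ definition above) =====
theorem tetfreq_spec : Claim_equal_tetfreq := by
  intro seq _
  unfold Spec_tetfreq
  rw [canonA, canonB]
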